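-- pv_equiv track=rewrite | github.com/Andrew-Foote/aoc | solutions/python/y2015/d25.py | code_grid
-- ===== SOURCE A (Python) =====
-- def row_and_col_to_index(row: int, col: int) -> int:
--     # 2 = 1 + 1
--     #     1
--     # 3 = 1 + 2; 2 + 1
--     #     3      2
--     # 4 = 3 + 1; 2 + 2; 1 + 4
--     #     6      5      4
--     # 5 = 4 + 1; 3 + 2; 2 + 3; 4 + 1
--     #     10     9      8      7
--     #
--     # 1, 3, 6, 10, ... are triangular numbers
--
--     n = row + col
--     s = (n * (n - 1)) // 2
--     return s - row + 1
--
-- def code_grid(ip: str) -> str: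
--     height = int(ip)
--
--     lines: list[str] = [
--         '   | ' + ''.join(f'{j:<4}' for j in range(1, height + 1)),
--         '---+' * (height + 1),
--     ]
--
--     for i in range(1, height + 1):
--         width = height - i + 1
--         cols = [row_and_col_to_index(i, j) for j in range(1, width + 1)]
--         lines.append(f' {i} | ' + '  '.join(f'{col:>2}' for col in cols))
--
--     return '\n'.join(lines)
-- ===== SOURCE B (Python) =====
-- def code_grid(ip: str) -> str:
--     height = int(ip)
--
--     header = '   | '
--     for j in range(1, height + 1):
--         header += f'{j:<4}'
--     lines = [header, '---+' * (height + 1)]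
--
--     start = 1  # value of the first cell of the current row, carried across rows
--     for i in range(1, height + 1):
--         v = start
--         cells = []
--         for j in range(1, height - i + 2):
--             cells.append(f'{v:>2}')
--             v += i + j
--         lines.append(f' {i} | ' + '  '.join(cells))
--         start += i
--
--     return '\n'.join(lines)
-- ===== Notes on version B (the rewrite author's own statement) =====
-- stated objective: alternative
-- what changed: B replaces the per-cell closed-form triangular-number formula (row_and_col_to_index called for every cell) by pure running accumulators: the first value of each row is carried across rows (start += i) and each cell value is accumulated along the row (v += i + j), so no multiplication or division is performed; the header is built by an accumulating loop instead of join.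
import Mathlib
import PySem

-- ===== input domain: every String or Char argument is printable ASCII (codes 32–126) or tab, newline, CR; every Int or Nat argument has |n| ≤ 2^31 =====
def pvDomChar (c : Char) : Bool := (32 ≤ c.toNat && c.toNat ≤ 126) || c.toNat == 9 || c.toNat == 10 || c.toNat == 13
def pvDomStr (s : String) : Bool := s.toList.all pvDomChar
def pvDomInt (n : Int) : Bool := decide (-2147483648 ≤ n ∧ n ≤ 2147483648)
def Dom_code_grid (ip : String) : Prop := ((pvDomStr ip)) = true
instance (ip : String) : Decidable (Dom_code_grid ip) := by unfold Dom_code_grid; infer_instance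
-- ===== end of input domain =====

-- B replaces the per-cell closed-form triangular formula by running accumulators (row start
-- carried across rows, cell value accumulated along each row); objective: alternative.

-- shared formatting helpers (both Pythons use the same f-string formats)
-- f'{n:<4}' : str(n) left-justified to width 4 (space fill) — ported by hand, exact for ints
def fmtL4 (n : Int) : List Char :=
  let s := PySem.Int.toChars n
  s ++ List.replicate (4 - s.length) ' '

-- f'{n:>2}' : str(n) right-justified to width 2 (space fill) — ported by hand, exact for ints
def fmtR2 (n : Int) : List Char :=
  let s := PySem.Int.toChars n
  List.replicate (2 - s.length) ' ' ++ s

-- '---+' * (height + 1) : Python string repetition — ported by hand, exact (negative count → empty)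
def sepLine (height : Int) : List Char :=
  (List.replicate (height + 1).toNat "---+".toList).flatten

-- ===== PORT A =====
def row_and_col_to_index (row : Int) (col : Int) : Int :=
  let n := row + col
  let s := PySem.Int.floordiv (n * (n - 1)) 2
  s - row + 1

def code_grid (ip : String) : String :=
  match PySem.Int.ofStr? ip with
  | none => ""   -- unreachable under Pre_code_grid (Python raises ValueError)
  | some height =>
    let lines : List (List Char) :=
      ["   | ".toList ++ PySem.Chars.join []
          ((PySem.List.pyRange 1 (height + 1) 1).map fmtL4),
       sepLine height]
    let lines :=
      (PySem.List.pyRange 1 (height + 1) 1).foldl (fun ls i =>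
        let width := height - i + 1
        let cols := (PySem.List.pyRange 1 (width + 1) 1).map
          (fun j => row_and_col_to_index i j)
        ls ++ [(' ' :: PySem.Int.toChars i ++ " | ".toList) ++
               PySem.Chars.join "  ".toList (cols.map fmtR2)]) lines
    String.ofList (PySem.Chars.join ['\n'] lines)

-- ===== PORT B =====
def code_grid_alt (ip : String) : String :=
  match PySem.Int.ofStr? ip with
  | none => ""   -- unreachable under Pre_code_grid (Python raises ValueError)
  | some height =>
    let header :=
      (PySem.List.pyRange 1 (height + 1) 1).foldl
        (fun acc j => acc ++ fmtL4 j) "   | ".toList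
    let lines : List (List Char) := [header, sepLine height]
    let st :=
      (PySem.List.pyRange 1 (height + 1) 1).foldl
        (fun (p : List (List Char) × Int) i =>
          let inner :=
            (PySem.List.pyRange 1 (height - i + 2) 1).foldl
              (fun (q : List (List Char) × Int) j =>
                (q.1 ++ [fmtR2 q.2], q.2 + i + j)) ([], p.2)
          (p.1 ++ [(' ' :: PySem.Int.toChars i ++ " | ".toList) ++
                   PySem.Chars.join "  ".toList inner.1],
           p.2 + i)) (lines, 1)
    String.ofList (PySem.Chars.join ['\n'] st.1)

-- ===== PRECONDITION & SPEC =====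
-- Pre_ excludes exactly the strings int() rejects, on which Python A raises ValueError.
def Pre_code_grid (ip : String) : Prop := (PySem.Int.ofStr? ip).isSome = true
instance (ip : String) : Decidable (Pre_code_grid ip) := by unfold Pre_code_grid; infer_instance
def pvWitness_code_grid : String := "5"

def Spec_code_grid (ip : String) (out : String) : Prop := out = code_grid_alt ip
instance (ip : String) (out : String) : Decidable (Spec_code_grid ip out) := by unfold Spec_code_grid; infer_instance

-- ===== CLAIM (what is proved, stated in full; the proofs are below) =====
def Claim_equal_code_grid : Prop := ∀ (ip : String), Dom_code_grid ip → Pre_code_grid ip → Spec_code_grid ip (code_grid ip)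

-- ===== LEMMAS AND PROOFS =====

-- n*(n-1) is even, so the floor division in the triangular formula is exact:
lemma tri_step (n : Int) :
    PySem.Int.floordiv ((n + 1) * n) 2 = PySem.Int.floordiv (n * (n - 1)) 2 + n := by
  obtain ⟨k, hk⟩ : 2 ∣ n * (n - 1) := Int.even_mul_pred_self n |>.two_dvd
  rw [PySem.Int.floordiv_eq_ediv_of_pos (by norm_num),
      PySem.Int.floordiv_eq_ediv_of_pos (by norm_num)]
  have h2 : (n + 1) * n = 2 * (k + n) := by rw [mul_add, ← hk]; ring
  rw [hk, h2, Int.mul_ediv_cancel_left _ (by norm_num), Int.mul_ediv_cancel_left _ (by norm_num)]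

-- B's header fold equals A's join of the mapped range
lemma header_fold (l : List Int) (init : List Char) :
    l.foldl (fun acc j => acc ++ fmtL4 j) init
      = init ++ PySem.Chars.join [] (l.map fmtL4) := by
  induction l generalizing init with
  | nil => simp [PySem.Chars.join_nil]
  | cons x xs ih =>
    simp only [List.foldl_cons, List.map_cons, ih]
    cases xs with
    | nil => simp [PySem.Chars.join_nil, PySem.Chars.join_singleton]
    | cons y t =>
      simp only [List.map_cons]
      rw [PySem.Chars.join_cons_cons]
      simp [List.append_assoc]

-- B's inner row fold produces exactly A's formula cells, given the running-value invariant
lemma inner_fold (i : Int) (m : Nat) :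
    ∀ (a : Int) (acc : List (List Char)) (v : Int),
      v = PySem.Int.floordiv ((i + a) * (i + a - 1)) 2 - i + 1 →
      ((PySem.List.pyRange a (a + m) 1).foldl
        (fun (q : List (List Char) × Int) j => (q.1 ++ [fmtR2 q.2], q.2 + i + j)) (acc, v)).1
      = acc ++ (PySem.List.pyRange a (a + m) 1).map (fun j => fmtR2 (row_and_col_to_index i j)) := by
  induction m with
  | zero => intro a acc v _; simp
  | succ k ih =>
    intro a acc v hv
    rw [PySem.List.pyRange_one_cons (by omega : a < a + (k + 1 : Nat))]
    simp only [List.foldl_cons, List.map_cons]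
    have hval : v = row_and_col_to_index i a := by
      simp [row_and_col_to_index, hv]
    have harg : a + 1 + (k : Int) = a + ((k : Nat) + 1 : Nat) := by push_cast; ring
    have hstep := ih (a + 1) (acc ++ [fmtR2 v]) (v + i + a) (by
      have hr : (i + (a + 1)) * (i + (a + 1) - 1) = (i + a + 1) * (i + a) := by ring
      rw [hr, tri_step (i + a)]; omega)
    rw [harg] at hstep
    rw [hstep, hval, List.append_assoc, List.singleton_append]

-- B's outer fold produces A's rows, carrying the row-start invariant
lemma outer_fold (height : Int) (m : Nat) :
    ∀ (a : Int) (ls : List (List Char)) (s : Int),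
      a + m ≤ height + 1 →
      s = PySem.Int.floordiv (a * (a - 1)) 2 + 1 →
      ((PySem.List.pyRange a (a + m) 1).foldl
        (fun (p : List (List Char) × Int) i =>
          let inner :=
            (PySem.List.pyRange 1 (height - i + 2) 1).foldl
              (fun (q : List (List Char) × Int) j =>
                (q.1 ++ [fmtR2 q.2], q.2 + i + j)) ([], p.2)
          (p.1 ++ [(' ' :: PySem.Int.toChars i ++ " | ".toList) ++
                   PySem.Chars.join "  ".toList inner.1],
           p.2 + i)) (ls, s)).1
      = (PySem.List.pyRange a (a + m) 1).foldl (fun acc i =>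
          let width := height - i + 1
          let cols := (PySem.List.pyRange 1 (width + 1) 1).map
            (fun j => row_and_col_to_index i j)
          acc ++ [(' ' :: PySem.Int.toChars i ++ " | ".toList) ++
                  PySem.Chars.join "  ".toList (cols.map fmtR2)]) ls := by
  induction m with
  | zero => intro a ls s _ _; simp
  | succ k ih =>
    intro a ls s hle hs
    rw [PySem.List.pyRange_one_cons (by omega : a < a + (k + 1 : Nat))]
    simp only [List.foldl_cons]
    have ha : a ≤ height := by omega
    have hw : height - a + 2 = 1 + ((height - a + 1).toNat : Int) := by omega
    have hinner := inner_fold a (height - a + 1).toNat 1 ([] : List (List Char)) s (by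
      have hr : (a + (1:Int)) * (a + 1 - 1) = (a + 1) * a := by ring
      rw [hr, tri_step a]; omega)
    rw [hw]
    have hstart : s + a = PySem.Int.floordiv ((a + 1) * (a + 1 - 1)) 2 + 1 := by
      have hr : (a + (1:Int)) * (a + 1 - 1) = (a + 1) * a := by ring
      rw [hr, tri_step a]; omega
    have harg : a + 1 + (k : Int) = a + ((k : Nat) + 1 : Nat) := by push_cast; ring
    have hstep := ih (a + 1)
      (ls ++ [(' ' :: PySem.Int.toChars a ++ " | ".toList) ++
              PySem.Chars.join "  ".toList
                (((PySem.List.pyRange 1 (height - a + 1 + 1) 1).map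
                  (fun j => fmtR2 (row_and_col_to_index a j))))])
      (s + a) (by omega) hstart
    rw [harg] at hstep
    have hww : (1 : Int) + ((height - a + 1).toNat : Int) = height - a + 1 + 1 := by omega
    rw [hinner]
    simp only [List.nil_append]
    rw [hww, hstep]
    simp only [List.map_map, Function.comp_def]

-- floordiv 0 2 = 0, used for the initial row-start value
lemma start_init : (1 : Int) = PySem.Int.floordiv (1 * (1 - 1)) 2 + 1 := by decide

-- ===== VERDICT (by name: the statement is the Claim_ definition above) =====
theorem code_grid_spec : Claim_equal_code_grid := by
  intro ip _ hpre
  unfold Spec_code_grid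
  unfold Pre_code_grid at hpre
  cases h : PySem.Int.ofStr? ip with
  | none => rw [h] at hpre; simp at hpre
  | some height =>
    simp only [code_grid, code_grid_alt, h]
    rw [header_fold]
    rcases le_or_gt 0 height with hh | hh
    · have hm : height + 1 = 1 + (height.toNat : Int) := by omega
      rw [hm, outer_fold height height.toNat 1 _ 1 (by omega) start_init]
    · rw [PySem.List.pyRange_one_eq_nil (by omega : height + 1 ≤ 1)]
      simp
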